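-- pv_equiv track=rewrite | github.com/cmdouglas/codeeval | ugly_numbers.py | compute_combination
-- ===== SOURCE A (Python) =====
-- def compute_combination(ops, digits, ndigits):
--     value = 0
--     num_str = ''
--     for i, digit in enumerate(digits):
--         op = None
--         num_str += digit
--         if i < ndigits-1:
--             op = ops[i]
--
--         if op and op != ' ':
--             value += int(num_str)
--             num_str = op
--
--     value += int(num_str)
--     return value
-- ===== SOURCE B (Python) =====
-- def compute_combination(ops, digits, ndigits):
--     # Build the arithmetic expression as a string (spaces dropped = concatenation),
--     # then evaluate it by scanning signed integer tokens and summing them.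
--     parts = []
--     for i, d in enumerate(digits):
--         parts.append(d)
--         if i < ndigits - 1 and ops[i] in ('+', '-'):
--             parts.append(ops[i])
--     expr = ''.join(parts)
--     total = 0
--     i = 0
--     n = len(expr)
--     while i < n:
--         sign = -1 if expr[i] == '-' else 1
--         if expr[i] in ('+', '-'):
--             i += 1
--         j = i
--         while j < n and expr[j].isdigit():
--             j += 1
--         total += sign * int(expr[i:j])
--         i = j
--     return total
-- ===== Notes on version B (the rewrite author's own statement) =====
-- stated objective: idiomatic
-- what changed: B replaces A's append/flush accumulator state machine by materializing the whole expression string in one pass (keeping only '+'/'-' operators, dropping spaces) and then evaluating it with a signed-integer token scan that sums the tokens.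
-- outside the precondition, e.g. on compute_combination(['3'], ['1', '2'], 2): A returns 33, B returns 12; on compute_combination([], ['1_0'], 0): A returns 10, B raises ValueError
import Mathlib
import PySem

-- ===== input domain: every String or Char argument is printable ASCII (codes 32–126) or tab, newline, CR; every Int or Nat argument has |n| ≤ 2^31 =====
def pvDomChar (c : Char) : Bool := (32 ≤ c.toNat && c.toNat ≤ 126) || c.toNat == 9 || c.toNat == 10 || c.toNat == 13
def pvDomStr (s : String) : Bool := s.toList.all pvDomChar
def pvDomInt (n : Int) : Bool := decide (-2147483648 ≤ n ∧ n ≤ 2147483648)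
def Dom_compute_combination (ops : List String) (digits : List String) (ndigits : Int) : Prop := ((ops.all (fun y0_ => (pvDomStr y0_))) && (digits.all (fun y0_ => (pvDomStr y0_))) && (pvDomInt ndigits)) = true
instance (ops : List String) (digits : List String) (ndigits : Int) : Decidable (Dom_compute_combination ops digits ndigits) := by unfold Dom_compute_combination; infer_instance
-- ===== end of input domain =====

-- B builds the whole expression string first and then evaluates it with a signed-integer
-- token scan, instead of A's append/flush accumulator state machine (objective: idiomatic).

-- ===== PORT A =====
-- A's loop over `digits` with state (value, num_str); num_str is kept as List Char.
-- `int(num_str)` is PySem.Int.ofChars? (none = ValueError, propagated), `ops[i]` is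
-- PySem.List.pyGet? (none = IndexError, propagated); both are excluded by Pre_.
def pvLoopA (ops : List String) (ndigits : Int) : List String → Nat → Int → List Char → Option Int
  | [], _, value, num => (PySem.Int.ofChars? num).map (fun v => value + v)
  | d :: rest, i, value, num =>
    let num' := num ++ d.toList
    if (i : Int) < ndigits - 1 then
      match PySem.List.pyGet? ops (i : Int) with
      | none => none                                   -- IndexError
      | some op =>
        if op ≠ "" ∧ op ≠ " " then                     -- `if op and op != ' '`
          match PySem.Int.ofChars? num' with
          | none => none                               -- ValueError
          | some v => pvLoopA ops ndigits rest (i + 1) (value + v) op.toList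
        else pvLoopA ops ndigits rest (i + 1) value num'
    else pvLoopA ops ndigits rest (i + 1) value num'

def compute_combination (ops : List String) (digits : List String) (ndigits : Int) : Int :=
  (pvLoopA ops ndigits digits 0 0 []).getD 0

-- ===== PORT B =====
-- Source B's first loop: build the expression (digits, keeping only '+'/'-' operators).
def pvBuild (ops : List String) (ndigits : Int) : List String → Nat → Option (List Char)
  | [], _ => some []
  | d :: rest, i =>
    if (i : Int) < ndigits - 1 then
      match PySem.List.pyGet? ops (i : Int) with
      | none => none                                   -- IndexError
      | some op =>
        (pvBuild ops ndigits rest (i + 1)).map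
          (fun tail => d.toList ++ (if op = "+" ∨ op = "-" then op.toList else []) ++ tail)
    else (pvBuild ops ndigits rest (i + 1)).map (fun tail => d.toList ++ tail)

-- Source B's while loop: consume one [sign]digits+ token per step and add it to total.
def pvScan : List Char → Int → Option Int
  | [], total => some total
  | c :: rest, total =>
    if c = '+' ∨ c = '-' then
      match PySem.Int.ofChars? (rest.takeWhile Char.isDigit) with
      | none => none                                   -- ValueError on int('')
      | some v => pvScan (rest.dropWhile Char.isDigit) (total + (if c = '-' then -1 else 1) * v)
    else
      match h : PySem.Int.ofChars? ((c :: rest).takeWhile Char.isDigit) with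
      | none => none                                   -- ValueError
      | some v => pvScan ((c :: rest).dropWhile Char.isDigit) (total + 1 * v)
termination_by cs _ => cs.length
decreasing_by
  · exact Nat.lt_succ_of_le (List.length_dropWhile_le _ _)
  · have hc : c.isDigit = true := by
      cases hcd : c.isDigit with
      | true => rfl
      | false =>
        rw [List.takeWhile_cons, hcd, if_neg (by decide),
          (by decide : PySem.Int.ofChars? ([] : List Char) = none)] at h
        exact absurd h (by simp)
    simp only [List.dropWhile, hc]
    exact Nat.lt_succ_of_le (List.length_dropWhile_le _ _)

def compute_combination_alt (ops : List String) (digits : List String) (ndigits : Int) : Int :=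
  match pvBuild ops ndigits digits 0 with
  | none => 0
  | some expr => (pvScan expr 0).getD 0

-- ===== PRECONDITION & SPEC =====
def pvOpOK (s : String) : Bool := s == "+" || s == "-" || s == " " || s == ""
-- an optionally signed, nonempty run of decimal digits (what one arithmetic token may be)
def pvTokenOK : List Char → Bool
  | [] => false
  | c :: t =>
    if c = '+' ∨ c = '-' then !t.isEmpty && t.all Char.isDigit
    else (c :: t).all Char.isDigit
-- whether A flushes at index j (consults ops[j] and it is an arithmetic operator)
def pvFlushB (ops : List String) (ndigits : Int) (j : Nat) : Bool :=
  decide ((j : Int) < ndigits - 1) &&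
    (PySem.List.pyGet? ops (j : Int)).any (fun op => op == "+" || op == "-")
-- Pre_ restricts to the task's natural domain, exactly where A returns a plain sum:
-- nonempty all-digit digit strings, every consulted operator one of '+', '-', ' ' (or the
-- equally inert ''), and no '+'/'-' operator consulted at the last digit (there A would
-- flush and then crash on int('+'|'-')).  Outside it A either raises (int() on a malformed
-- accumulator, ops[i] IndexError, empty digits) or returns an accidental concatenation
-- value of its flush machinery (e.g. a numeric operator string glued into the next number).
def Pre_compute_combination (ops : List String) (digits : List String) (ndigits : Int) : Prop :=
  digits ≠ [] ∧
  (∀ j ∈ List.range digits.length, (j : Int) < ndigits - 1 →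
      ((PySem.List.pyGet? ops (j : Int)).any pvOpOK) = true) ∧
  ((∀ j ∈ List.range digits.length, pvFlushB ops ndigits j = false) →
      pvTokenOK (digits.flatMap (fun d => d.toList)) = true) ∧
  ((¬ ∀ j ∈ List.range digits.length, pvFlushB ops ndigits j = false) →
      (∀ d0, digits.head? = some d0 → pvTokenOK d0.toList = true) ∧
      (∀ d ∈ digits.tail, d.toList ≠ [] ∧ d.toList.all Char.isDigit = true) ∧
      pvFlushB ops ndigits (digits.length - 1) = false)
instance (ops : List String) (digits : List String) (ndigits : Int) : Decidable (Pre_compute_combination ops digits ndigits) := by unfold Pre_compute_combination; infer_instance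

def pvWitness_compute_combination : List String × List String × Int := (["+", " "], ["1", "2", "34"], 3)

def Spec_compute_combination (ops : List String) (digits : List String) (ndigits : Int) (out : Int) : Prop := out = compute_combination_alt ops digits ndigits
instance (ops : List String) (digits : List String) (ndigits : Int) (out : Int) : Decidable (Spec_compute_combination ops digits ndigits out) := by unfold Spec_compute_combination; infer_instance

-- ===== CLAIM (what is proved, stated in full; the proofs are below) =====
def Claim_equal_compute_combination : Prop := ∀ (ops : List String) (digits : List String) (ndigits : Int), Dom_compute_combination ops digits ndigits → Pre_compute_combination ops digits ndigits → Spec_compute_combination ops digits ndigits (compute_combination ops digits ndigits)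

-- ===== LEMMAS AND PROOFS =====

-- a consulted operator that concatenates instead of flushing
def pvOpConcat (s : String) : Bool := s == " " || s == ""

theorem pv_noSpace (c : Char) (h : c.isDigit = true) : PySem.Int.isIntSpace c = false := by
  simp only [PySem.Int.isIntSpace, Bool.or_eq_false_iff, decide_eq_false_iff_not]
  refine ⟨⟨⟨⟨⟨?_, ?_⟩, ?_⟩, ?_⟩, ?_⟩, ?_⟩ <;> rintro rfl <;> simp at h

theorem pv_dw_self (l : List Char) (h : ∀ c ∈ l, PySem.Int.isIntSpace c = false) :
    l.dropWhile PySem.Int.isIntSpace = l := by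
  cases l with
  | nil => rfl
  | cons c t => simp [List.dropWhile, h c (by simp)]

theorem pv_strip_id (l : List Char) (h : ∀ c ∈ l, PySem.Int.isIntSpace c = false) :
    (List.dropWhile PySem.Int.isIntSpace (List.dropWhile PySem.Int.isIntSpace l).reverse).reverse = l := by
  rw [pv_dw_self l h, pv_dw_self _ (by intro c hc; exact h c (by simpa using hc)), List.reverse_reverse]

theorem pv_ofChars?_plus (ds : List Char) (h : ∀ c ∈ ds, c.isDigit = true) :
    PySem.Int.ofChars? ('+' :: ds) = PySem.Int.ofChars? ds := by
  unfold PySem.Int.ofChars?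
  rw [pv_strip_id, pv_strip_id]
  · dsimp only
    cases ds with
    | nil => rfl
    | cons c t =>
      have hc := h c (by simp)
      have h1 : c ≠ '-' := by rintro rfl; simp at hc
      have h2 : c ≠ '+' := by rintro rfl; simp at hc
      split
      · next ds' heq => simp at heq
      · next ds' heq =>
        injection heq with _ h'
        subst h'
        split
        · next ds2 heq2 => exact absurd (List.head_eq_of_cons_eq heq2) h1
        · next ds2 heq2 => exact absurd (List.head_eq_of_cons_eq heq2) h2
        · rfl
      · next h1' h2' => exact absurd rfl (h2' (c :: t))
  · intro c hc; exact pv_noSpace c (h c hc)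
  · intro c hc
    rcases List.mem_cons.mp hc with rfl | hm
    · decide
    · exact pv_noSpace c (h c hm)

theorem pv_ofChars?_minus (ds : List Char) (h : ∀ c ∈ ds, c.isDigit = true) :
    PySem.Int.ofChars? ('-' :: ds) = (PySem.Int.ofChars? ds).map (fun v => -v) := by
  unfold PySem.Int.ofChars?
  rw [pv_strip_id, pv_strip_id]
  · dsimp only
    cases ds with
    | nil => rfl
    | cons c t =>
      have hc := h c (by simp)
      have h1 : c ≠ '-' := by rintro rfl; simp at hc
      have h2 : c ≠ '+' := by rintro rfl; simp at hc
      split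
      · next ds' heq =>
        injection heq with _ h'
        subst h'
        split
        · next ds2 heq2 => exact absurd (List.head_eq_of_cons_eq heq2) h1
        · next ds2 heq2 => exact absurd (List.head_eq_of_cons_eq heq2) h2
        · simp
      · next ds' heq => simp at heq
      · next h1' h2' => exact absurd rfl (h1' (c :: t))
  · intro c hc; exact pv_noSpace c (h c hc)
  · intro c hc
    rcases List.mem_cons.mp hc with rfl | hm
    · decide
    · exact pv_noSpace c (h c hm)

theorem pvScan_cons (c : Char) (rest : List Char) (total : Int) :
    pvScan (c :: rest) total
      = if c = '+' ∨ c = '-' then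
          match PySem.Int.ofChars? (rest.takeWhile Char.isDigit) with
          | none => none
          | some v => pvScan (rest.dropWhile Char.isDigit) (total + (if c = '-' then -1 else 1) * v)
        else
          match PySem.Int.ofChars? ((c :: rest).takeWhile Char.isDigit) with
          | none => none
          | some v => pvScan ((c :: rest).dropWhile Char.isDigit) (total + 1 * v) := by
  rw [pvScan]
  cases PySem.Int.ofChars? ((c :: rest).takeWhile Char.isDigit) <;> simp

-- pvScan consumes exactly one [sign]digits+ token when the next character is not a digit.
theorem pv_scan_token (sgn ds tail : List Char) (s total : Int)
    (hsgn : (sgn = [] ∧ s = 1) ∨ (sgn = ['+'] ∧ s = 1) ∨ (sgn = ['-'] ∧ s = -1))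
    (hds : ∀ c ∈ ds, c.isDigit = true) (hne : ds ≠ [])
    (htail : ∀ c, tail.head? = some c → c.isDigit = false) :
    pvScan (sgn ++ ds ++ tail) total
      = match PySem.Int.ofChars? ds with
        | none => none
        | some v => pvScan tail (total + s * v) := by
  have htake : (ds ++ tail).takeWhile Char.isDigit = ds := by
    rw [List.takeWhile_append_of_pos hds]
    cases tail with
    | nil => simp
    | cons c' t' => rw [List.takeWhile_cons, htail c' rfl]; simp
  have hdrop : (ds ++ tail).dropWhile Char.isDigit = tail := by
    rw [List.dropWhile_append_of_pos hds]
    cases tail with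
    | nil => rfl
    | cons c' t' => rw [List.dropWhile_cons, htail c' rfl]; simp
  rcases hsgn with ⟨rfl, rfl⟩ | ⟨rfl, rfl⟩ | ⟨rfl, rfl⟩
  · cases ds with
    | nil => exact absurd rfl hne
    | cons c t =>
      have hc : c.isDigit = true := hds c (by simp)
      have hns : ¬(c = '+' ∨ c = '-') := by rintro (rfl | rfl) <;> simp at hc
      rw [List.nil_append, List.cons_append, pvScan_cons, if_neg hns, ← List.cons_append, htake, hdrop]
  · rw [List.cons_append, List.nil_append]
    refine (pvScan_cons '+' (ds ++ tail) total).trans ?_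
    rw [if_pos (Or.inl rfl), htake, hdrop]
    cases PySem.Int.ofChars? ds with
    | none => rfl
    | some v => rw [if_neg (by decide : ¬('+' : Char) = '-')]
  · rw [List.cons_append, List.nil_append]
    refine (pvScan_cons '-' (ds ++ tail) total).trans ?_
    rw [if_pos (Or.inr rfl), htake, hdrop]
    cases PySem.Int.ofChars? ds with
    | none => rfl
    | some v => rw [if_pos rfl]

theorem pv_sign_full (sgn ds : List Char) (s : Int)
    (hsgn : (sgn = [] ∧ s = 1) ∨ (sgn = ['+'] ∧ s = 1) ∨ (sgn = ['-'] ∧ s = -1))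
    (hds : ∀ c ∈ ds, c.isDigit = true) :
    PySem.Int.ofChars? (sgn ++ ds) = (PySem.Int.ofChars? ds).map (fun v => s * v) := by
  rcases hsgn with ⟨rfl, rfl⟩ | ⟨rfl, rfl⟩ | ⟨rfl, rfl⟩
  · rw [List.nil_append]
    cases PySem.Int.ofChars? ds <;> simp
  · rw [List.cons_append, List.nil_append, pv_ofChars?_plus ds hds]
    cases PySem.Int.ofChars? ds <;> simp
  · rw [List.cons_append, List.nil_append, pv_ofChars?_minus ds hds]
    cases PySem.Int.ofChars? ds <;> simp

-- splitting one well-formed token into its sign and its digit run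
theorem pv_token_split (cs : List Char) (h : pvTokenOK cs = true) :
    ∃ (sgn : List Char) (s : Int) (ds : List Char), cs = sgn ++ ds ∧
      ((sgn = [] ∧ s = 1) ∨ (sgn = ['+'] ∧ s = 1) ∨ (sgn = ['-'] ∧ s = -1)) ∧
      (∀ c ∈ ds, c.isDigit = true) ∧ ds ≠ [] := by
  cases cs with
  | nil => simp [pvTokenOK] at h
  | cons c t =>
    rw [pvTokenOK] at h
    by_cases hcs : c = '+' ∨ c = '-'
    · rw [if_pos hcs] at h
      simp only [Bool.and_eq_true, Bool.not_eq_eq_eq_not, Bool.not_true,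
        List.isEmpty_eq_false_iff] at h
      refine ⟨[c], (if c = '-' then -1 else 1), t, rfl, ?_,
        fun c' hc' => List.all_eq_true.mp h.2 c' hc', h.1⟩
      rcases hcs with rfl | rfl
      · exact Or.inr (Or.inl ⟨rfl, by decide⟩)
      · exact Or.inr (Or.inr ⟨rfl, by decide⟩)
    · rw [if_neg hcs] at h
      exact ⟨[], 1, c :: t, rfl, Or.inl ⟨rfl, rfl⟩,
        fun c' hc' => List.all_eq_true.mp h c' hc', by simp⟩

-- when every consulted operator is ' ' or '', A's loop only ever concatenates
theorem pv_noflushA (ops : List String) (nd : Int) (rest : List String) : ∀ (i : Nat) (value : Int) (num : List Char),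
    (∀ j : Nat, j < rest.length → ((i + j : Nat) : Int) < nd - 1 →
        ((PySem.List.pyGet? ops ((i + j : Nat) : Int)).any pvOpConcat) = true) →
    pvLoopA ops nd rest i value num
      = (PySem.Int.ofChars? (num ++ rest.flatMap (fun d => d.toList))).map (fun v => value + v) := by
  induction rest with
  | nil => intro i value num _; rw [pvLoopA]; simp
  | cons d rest' ih =>
    intro i value num hop
    have hop' : ∀ j : Nat, j < rest'.length → ((i + 1 + j : Nat) : Int) < nd - 1 →
        ((PySem.List.pyGet? ops ((i + 1 + j : Nat) : Int)).any pvOpConcat) = true := by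
      intro j hj hlt
      have hj' : j + 1 < (d :: rest').length := by simpa using Nat.succ_lt_succ hj
      have := hop (j + 1) hj'
      rw [show i + (j + 1) = i + 1 + j by omega] at this
      exact this hlt
    rw [pvLoopA]
    by_cases hlt : (i : Int) < nd - 1
    · rw [if_pos hlt]
      have h0 := hop 0 (by simp) (by rw [Nat.add_zero]; exact hlt)
      rw [Nat.add_zero] at h0
      cases hg : PySem.List.pyGet? ops (i : Int) with
      | none => rw [hg] at h0; simp [Option.any] at h0
      | some op =>
        rw [hg] at h0
        dsimp only
        simp only [pvOpConcat, Option.any, Bool.or_eq_true, beq_iff_eq] at h0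
        have hcond : ¬(op ≠ "" ∧ op ≠ " ") := by
          rcases h0 with rfl | rfl <;> simp
        rw [if_neg hcond, ih (i + 1) value (num ++ d.toList) hop']
        simp [List.append_assoc]
    · rw [if_neg hlt, ih (i + 1) value (num ++ d.toList) hop']
      simp [List.append_assoc]

-- under the same condition B's builder keeps exactly the digit characters
theorem pv_noflushB (ops : List String) (nd : Int) (rest : List String) : ∀ (i : Nat),
    (∀ j : Nat, j < rest.length → ((i + j : Nat) : Int) < nd - 1 →
        ((PySem.List.pyGet? ops ((i + j : Nat) : Int)).any pvOpConcat) = true) →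
    pvBuild ops nd rest i = some (rest.flatMap (fun d => d.toList)) := by
  induction rest with
  | nil => intro i _; rfl
  | cons d rest' ih =>
    intro i hop
    have hop' : ∀ j : Nat, j < rest'.length → ((i + 1 + j : Nat) : Int) < nd - 1 →
        ((PySem.List.pyGet? ops ((i + 1 + j : Nat) : Int)).any pvOpConcat) = true := by
      intro j hj hlt
      have hj' : j + 1 < (d :: rest').length := by simpa using Nat.succ_lt_succ hj
      have := hop (j + 1) hj'
      rw [show i + (j + 1) = i + 1 + j by omega] at this
      exact this hlt
    rw [pvBuild]
    by_cases hlt : (i : Int) < nd - 1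
    · rw [if_pos hlt]
      have h0 := hop 0 (by simp) (by rw [Nat.add_zero]; exact hlt)
      rw [Nat.add_zero] at h0
      cases hg : PySem.List.pyGet? ops (i : Int) with
      | none => rw [hg] at h0; simp [Option.any] at h0
      | some op =>
        rw [hg] at h0
        dsimp only
        simp only [pvOpConcat, Option.any, Bool.or_eq_true, beq_iff_eq] at h0
        have hcond : ¬(op = "+" ∨ op = "-") := by
          rcases h0 with rfl | rfl <;> simp
        rw [if_neg hcond, ih (i + 1) hop']
        simp
    · rw [if_neg hlt, ih (i + 1) hop']
      simp

-- Main invariant: A's loop from state (value, sgn ++ ds) equals building the rest of the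
-- expression and scanning it after the pending token.  The head of `rest` may still be a
-- signed token when the pending token is empty (the very first digit string).
theorem pv_main (ops : List String) (nd : Int) (rest : List String) : ∀ (i : Nat) (value s : Int) (sgn ds : List Char),
    ((sgn = [] ∧ s = 1) ∨ (sgn = ['+'] ∧ s = 1) ∨ (sgn = ['-'] ∧ s = -1)) →
    (∀ c ∈ ds, c.isDigit = true) →
    (∀ d ∈ rest.tail, d.toList ≠ [] ∧ ∀ c ∈ d.toList, c.isDigit = true) →
    (∀ d0, rest.head? = some d0 →
        ((sgn = [] ∧ ds = []) → pvTokenOK d0.toList = true) ∧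
        (¬(sgn = [] ∧ ds = []) → d0.toList ≠ [] ∧ ∀ c ∈ d0.toList, c.isDigit = true)) →
    (∀ j : Nat, j < rest.length → ((i + j : Nat) : Int) < nd - 1 →
        ((PySem.List.pyGet? ops ((i + j : Nat) : Int)).any pvOpOK) = true) →
    (sgn = [] → ds = [] → rest ≠ []) →
    pvLoopA ops nd rest i value (sgn ++ ds)
      = (pvBuild ops nd rest i).bind (fun tail => pvScan (sgn ++ ds ++ tail) value) := by
  induction rest with
  | nil =>
    intro i value s sgn ds hsgn hds _ _ _ hne
    rw [pvLoopA, pvBuild, Option.bind_some, List.append_nil]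
    cases hd0 : ds with
    | nil =>
      subst hd0
      rcases hsgn with ⟨rfl, rfl⟩ | ⟨rfl, rfl⟩ | ⟨rfl, rfl⟩
      · exact absurd rfl (hne rfl rfl)
      · refine Eq.trans ?_ (pvScan_cons '+' [] value).symm
        rw [if_pos (Or.inl rfl)]
        simp [(by decide : PySem.Int.ofChars? ['+'] = none),
          (by decide : PySem.Int.ofChars? ([] : List Char) = none)]
      · refine Eq.trans ?_ (pvScan_cons '-' [] value).symm
        rw [if_pos (Or.inr rfl)]
        simp [(by decide : PySem.Int.ofChars? ['-'] = none),
          (by decide : PySem.Int.ofChars? ([] : List Char) = none)]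
    | cons c t =>
      rw [← hd0]
      have hne' : ds ≠ [] := by rw [hd0]; simp
      have htok := pv_scan_token sgn ds [] s value hsgn hds hne' (by intro c h; simp at h)
      rw [List.append_nil] at htok
      rw [htok, pv_sign_full sgn ds s hsgn hds]
      cases PySem.Int.ofChars? ds with
      | none => rfl
      | some v => simp only [Option.map_some]; rw [pvScan.eq_def]
  | cons d rest' ih =>
    intro i value s sgn ds hsgn hds htail hhead hop hne
    have htail' : ∀ d' ∈ rest'.tail, d'.toList ≠ [] ∧ ∀ c ∈ d'.toList, c.isDigit = true :=
      fun d' h => htail d' (List.mem_of_mem_tail h)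
    have hhead' : ∀ (sgn₂ ds₂ : List Char), ¬(sgn₂ = [] ∧ ds₂ = []) →
        ∀ d0, rest'.head? = some d0 →
          ((sgn₂ = [] ∧ ds₂ = []) → pvTokenOK d0.toList = true) ∧
          (¬(sgn₂ = [] ∧ ds₂ = []) → d0.toList ≠ [] ∧ ∀ c ∈ d0.toList, c.isDigit = true) := by
      intro sgn₂ ds₂ h2 d0 hh
      exact ⟨fun h => absurd h h2, fun _ => htail d0 (List.mem_of_mem_head? hh)⟩
    have hop' : ∀ j : Nat, j < rest'.length → ((i + 1 + j : Nat) : Int) < nd - 1 →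
        ((PySem.List.pyGet? ops ((i + 1 + j : Nat) : Int)).any pvOpOK) = true := by
      intro j hj hlt
      have hj' : j + 1 < (d :: rest').length := by simpa using Nat.succ_lt_succ hj
      have := hop (j + 1) hj'
      rw [show i + (j + 1) = i + 1 + j by omega] at this
      exact this hlt
    have hX : ∃ (sgn₁ : List Char) (s₁ : Int) (ds₁ : List Char),
        (sgn ++ ds) ++ d.toList = sgn₁ ++ ds₁ ∧
        ((sgn₁ = [] ∧ s₁ = 1) ∨ (sgn₁ = ['+'] ∧ s₁ = 1) ∨ (sgn₁ = ['-'] ∧ s₁ = -1)) ∧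
        (∀ c ∈ ds₁, c.isDigit = true) ∧ ds₁ ≠ [] := by
      obtain ⟨htok, hdigd⟩ := hhead d rfl
      by_cases hemp : sgn = [] ∧ ds = []
      · obtain ⟨rfl, rfl⟩ := hemp
        obtain ⟨sgn₁, s₁, ds₁, hsplit, hs₁, hd₁, hn₁⟩ := pv_token_split d.toList (htok ⟨rfl, rfl⟩)
        exact ⟨sgn₁, s₁, ds₁, by simp [hsplit], hs₁, hd₁, hn₁⟩
      · obtain ⟨hdne, hdd⟩ := hdigd hemp
        refine ⟨sgn, s, ds ++ d.toList, by simp, hsgn, ?_, by simp [hdne]⟩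
        intro c hc
        rcases List.mem_append.mp hc with h | h
        · exact hds c h
        · exact hdd c h
    obtain ⟨sgn₁, s₁, ds₁, heq, hsgn₁, hds₁, hne₁⟩ := hX
    rw [pvLoopA, pvBuild]
    by_cases hlt : (i : Int) < nd - 1
    · rw [if_pos hlt, if_pos hlt]
      have h0 := hop 0 (by simp) (by rw [Nat.add_zero]; exact hlt)
      rw [Nat.add_zero] at h0
      cases hg : PySem.List.pyGet? ops (i : Int) with
      | none => rw [hg] at h0; simp [Option.any] at h0
      | some op =>
        rw [hg] at h0
        dsimp only
        simp only [pvOpOK, Option.any, Bool.or_eq_true, beq_iff_eq] at h0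
        rcases h0 with ((rfl | rfl) | rfl) | rfl
        · -- op = "+" : flush
          rw [if_pos (by decide), if_pos (Or.inl rfl), heq,
            pv_sign_full sgn₁ ds₁ s₁ hsgn₁ hds₁,
            (by decide : ("+" : String).toList = ['+'])]
          cases hb : pvBuild ops nd rest' (i + 1) with
          | none =>
            cases PySem.Int.ofChars? ds₁ with
            | none => simp
            | some v =>
              simp only [Option.map_some]
              have hih := ih (i + 1) (value + s₁ * v) 1 ['+'] [] (Or.inr (Or.inl ⟨rfl, rfl⟩))
                (by intro c h; simp at h) htail' (hhead' ['+'] [] (by simp)) hop'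
                (by intro h; simp at h)
              simp only [List.append_nil] at hih
              rw [hih, hb]
              simp
          | some tail =>
            simp only [Option.map_some, Option.bind_some]
            have htok := pv_scan_token sgn₁ ds₁ ('+' :: tail) s₁ value hsgn₁ hds₁ hne₁
              (by intro c h; simp at h; rw [← h]; decide)
            rw [show sgn₁ ++ ds₁ ++ '+' :: tail
                  = sgn ++ ds ++ (d.toList ++ ['+'] ++ tail) by rw [← heq]; simp] at htok
            rw [htok]
            cases PySem.Int.ofChars? ds₁ with
            | none => simp
            | some v =>
              simp only [Option.map_some]
              have hih := ih (i + 1) (value + s₁ * v) 1 ['+'] [] (Or.inr (Or.inl ⟨rfl, rfl⟩))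
                (by intro c h; simp at h) htail' (hhead' ['+'] [] (by simp)) hop'
                (by intro h; simp at h)
              simp only [List.append_nil] at hih
              rw [hih, hb]
              simp
        · -- op = "-" : flush
          rw [if_pos (by decide), if_pos (Or.inr rfl), heq,
            pv_sign_full sgn₁ ds₁ s₁ hsgn₁ hds₁,
            (by decide : ("-" : String).toList = ['-'])]
          cases hb : pvBuild ops nd rest' (i + 1) with
          | none =>
            cases PySem.Int.ofChars? ds₁ with
            | none => simp
            | some v =>
              simp only [Option.map_some]
              have hih := ih (i + 1) (value + s₁ * v) (-1) ['-'] [] (Or.inr (Or.inr ⟨rfl, rfl⟩))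
                (by intro c h; simp at h) htail' (hhead' ['-'] [] (by simp)) hop'
                (by intro h; simp at h)
              simp only [List.append_nil] at hih
              rw [hih, hb]
              simp
          | some tail =>
            simp only [Option.map_some, Option.bind_some]
            have htok := pv_scan_token sgn₁ ds₁ ('-' :: tail) s₁ value hsgn₁ hds₁ hne₁
              (by intro c h; simp at h; rw [← h]; decide)
            rw [show sgn₁ ++ ds₁ ++ '-' :: tail
                  = sgn ++ ds ++ (d.toList ++ ['-'] ++ tail) by rw [← heq]; simp] at htok
            rw [htok]
            cases PySem.Int.ofChars? ds₁ with
            | none => simp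
            | some v =>
              simp only [Option.map_some]
              have hih := ih (i + 1) (value + s₁ * v) (-1) ['-'] [] (Or.inr (Or.inr ⟨rfl, rfl⟩))
                (by intro c h; simp at h) htail' (hhead' ['-'] [] (by simp)) hop'
                (by intro h; simp at h)
              simp only [List.append_nil] at hih
              rw [hih, hb]
              simp
        · -- op = " " : concatenation
          rw [if_neg (by decide), if_neg (by decide), heq,
            ih (i + 1) value s₁ sgn₁ ds₁ hsgn₁ hds₁ htail'
              (hhead' sgn₁ ds₁ (fun h => hne₁ h.2)) hop' (fun _ h => absurd h hne₁)]
          cases pvBuild ops nd rest' (i + 1) <;> simp [← heq, List.append_assoc]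
        · -- op = "" : concatenation
          rw [if_neg (by decide), if_neg (by decide), heq,
            ih (i + 1) value s₁ sgn₁ ds₁ hsgn₁ hds₁ htail'
              (hhead' sgn₁ ds₁ (fun h => hne₁ h.2)) hop' (fun _ h => absurd h hne₁)]
          cases pvBuild ops nd rest' (i + 1) <;> simp [← heq, List.append_assoc]
    · rw [if_neg hlt, if_neg hlt, heq,
        ih (i + 1) value s₁ sgn₁ ds₁ hsgn₁ hds₁ htail'
          (hhead' sgn₁ ds₁ (fun h => hne₁ h.2)) hop' (fun _ h => absurd h hne₁)]
      cases pvBuild ops nd rest' (i + 1) <;> simp [← heq, List.append_assoc]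

-- ===== VERDICT (by name: the statement is the Claim_ definition above) =====
theorem compute_combination_spec : Claim_equal_compute_combination := by
  intro ops digits ndigits _ hpre
  obtain ⟨hne, hops, hnf, hf⟩ := hpre
  unfold Spec_compute_combination compute_combination compute_combination_alt
  by_cases hC : ∀ j ∈ List.range digits.length, pvFlushB ops ndigits j = false
  · -- no flush is ever consulted: both sides concatenate everything into one token
    have hopc : ∀ j : Nat, j < digits.length → ((0 + j : Nat) : Int) < ndigits - 1 →
        ((PySem.List.pyGet? ops ((0 + j : Nat) : Int)).any pvOpConcat) = true := by
      intro j hj hlt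
      rw [Nat.zero_add] at hlt ⊢
      have h4 := hops j (List.mem_range.mpr hj) hlt
      have hfl := hC j (List.mem_range.mpr hj)
      rw [pvFlushB] at hfl
      cases hg : PySem.List.pyGet? ops (j : Int) with
      | none => rw [hg] at h4; simp [Option.any] at h4
      | some op =>
        rw [hg] at h4 hfl
        simp only [pvOpOK, Option.any, Bool.or_eq_true, beq_iff_eq] at h4
        simp only [decide_eq_true hlt, Bool.true_and, Option.any] at hfl
        rcases h4 with ((rfl | rfl) | rfl) | rfl
        · simp at hfl
        · simp at hfl
        · decide
        · decide
    have hA := pv_noflushA ops ndigits digits 0 0 [] hopc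
    have hB := pv_noflushB ops ndigits digits 0 hopc
    rw [List.nil_append] at hA
    rw [hA, hB]
    show (Option.map (fun v => 0 + v)
        (PySem.Int.ofChars? (digits.flatMap (fun d => d.toList)))).getD 0
      = (pvScan (digits.flatMap (fun d => d.toList)) 0).getD 0
    obtain ⟨sgn, sg, ds, hsplit, hsgn, hds, hdne⟩ :=
      pv_token_split (digits.flatMap (fun d => d.toList)) (hnf hC)
    have htok := pv_scan_token sgn ds [] sg 0 hsgn hds hdne (by intro c h; simp at h)
    rw [List.append_nil] at htok
    rw [hsplit, htok, pv_sign_full sgn ds sg hsgn hds]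
    cases PySem.Int.ofChars? ds with
    | none => simp
    | some v => simp only [Option.map_some]; rw [pvScan.eq_def]
  · -- at least one flush: the grouped invariant proof
    obtain ⟨hhead, htail, _⟩ := hf hC
    have htail' : ∀ d ∈ digits.tail, d.toList ≠ [] ∧ ∀ c ∈ d.toList, c.isDigit = true := by
      intro d hd
      obtain ⟨h1, h2⟩ := htail d hd
      exact ⟨h1, fun c hc => List.all_eq_true.mp h2 c hc⟩
    have h := pv_main ops ndigits digits 0 0 1 [] []
      (Or.inl ⟨rfl, rfl⟩) (by simp) htail'
      (fun d0 hd0 => ⟨fun _ => hhead d0 hd0, fun h => absurd ⟨rfl, rfl⟩ h⟩)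
      (by intro j hj hlt; simpa using hops j (List.mem_range.mpr hj) (by simpa using hlt))
      (fun _ _ => hne)
    simp only [List.nil_append] at h
    rw [h]
    cases hb : pvBuild ops ndigits digits 0 with
    | none => simp
    | some expr => simp
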